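-- pv_equiv track=rewrite | github.com/sulavchhetri/invoice-handler-backend | tests/test_invoice.py | divide_invoices_by_depth
-- ===== SOURCE A (Python) =====
-- def divide_invoices_by_depth(invoices):
--     invoices_by_depth = {}
--
--     for invoice in invoices:
--         task_id = invoice['task_id']
--         depth = len(str(task_id).split('.')) - 1
--         if depth not in invoices_by_depth:
--             invoices_by_depth[depth] = {}
--
--         invoices_by_depth[depth][task_id] = invoice
--
--     return invoices_by_depth
-- ===== SOURCE B (Python) =====
-- def divide_invoices_by_depth(invoices):
--     tagged = [(str(inv['task_id']).count('.'), inv) for inv in invoices]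
--     return {d: {inv['task_id']: inv for dd, inv in tagged if dd == d}
--             for d in dict.fromkeys(d for d, _ in tagged)}
-- ===== Notes on version B (the rewrite author's own statement) =====
-- stated objective: idiomatic
-- what changed: A buckets invoices into a nested dict in one imperative pass; B tags each invoice with its depth (computed by count('.') instead of len(split('.'))-1), then builds the result as a group-by: for each first-occurrence depth, a filtering dict-comprehension over the tagged list.
import Mathlib
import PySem

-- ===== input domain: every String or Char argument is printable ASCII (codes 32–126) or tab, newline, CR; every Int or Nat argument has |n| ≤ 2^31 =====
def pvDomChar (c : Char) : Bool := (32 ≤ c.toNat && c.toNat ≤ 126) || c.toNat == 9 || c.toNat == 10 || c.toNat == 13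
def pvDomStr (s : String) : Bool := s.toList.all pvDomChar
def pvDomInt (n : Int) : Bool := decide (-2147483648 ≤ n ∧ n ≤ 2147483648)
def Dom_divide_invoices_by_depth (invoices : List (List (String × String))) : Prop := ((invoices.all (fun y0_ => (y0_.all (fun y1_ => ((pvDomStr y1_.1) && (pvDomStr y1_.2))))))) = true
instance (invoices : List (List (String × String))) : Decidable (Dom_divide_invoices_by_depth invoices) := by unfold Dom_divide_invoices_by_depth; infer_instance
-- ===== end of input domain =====

-- B replaces A's single-pass nested-dict bucketing by a group-by-comprehension: tag each invoice
-- with its depth once, then build each depth's inner dict by a filtering dict-comprehension over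
-- the tagged list (depth computed via count('.') instead of len(split('.'))-1). Objective: idiomatic.

-- ===== PORT A =====
def divide_invoices_by_depth (invoices : List (List (String × String))) : List (Int × List (String × List (String × String))) :=
  let invoices_by_depth :=
    invoices.foldl (fun d inv =>
      let task_id := (PySem.Dict.mk inv).getD "task_id" ""        -- invoice['task_id'] (Pre_ guarantees presence)
      let depth : Int := (((PySem.Str.split? task_id ".").getD []).length : Int) - 1
      let d := if d.contains depth then d else d.insert depth PySem.Dict.empty
      d.insert depth ((d.getD depth PySem.Dict.empty).insert task_id inv))
      (PySem.Dict.empty : PySem.Dict Int (PySem.Dict String (List (String × String))))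
  invoices_by_depth.items.map (fun p => (p.1, p.2.items))

-- ===== PORT B =====
def divide_invoices_by_depth_alt (invoices : List (List (String × String))) : List (Int × List (String × List (String × String))) :=
  let tagged := invoices.map (fun inv =>
    ((PySem.Str.count ((PySem.Dict.mk inv).getD "task_id" "") "." : Int), inv))
  (PySem.List.dedup (tagged.map (fun p => p.1))).map (fun d =>
    (d, (PySem.Dict.ofList ((tagged.filter (fun p => p.1 == d)).map
          (fun p => ((PySem.Dict.mk p.2).getD "task_id" "", p.2)))).items))

-- ===== PRECONDITION & SPEC =====
-- Pre_ excludes exactly the invoices missing the key 'task_id', on which Python A raises KeyError.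
def Pre_divide_invoices_by_depth (invoices : List (List (String × String))) : Prop :=
  ∀ inv ∈ invoices, (PySem.Dict.mk inv).contains "task_id" = true
instance (invoices : List (List (String × String))) : Decidable (Pre_divide_invoices_by_depth invoices) := by unfold Pre_divide_invoices_by_depth; infer_instance

def pvWitness_divide_invoices_by_depth : (List (List (String × String))) :=
  [[("task_id", "1.2"), ("amount", "5")], [("task_id", "1"), ("amount", "3")], [("task_id", "1.2")]]

def Spec_divide_invoices_by_depth (invoices : List (List (String × String))) (out : List (Int × List (String × List (String × String)))) : Prop := out = divide_invoices_by_depth_alt invoices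
instance (invoices : List (List (String × String))) (out : List (Int × List (String × List (String × String)))) : Decidable (Spec_divide_invoices_by_depth invoices out) := by unfold Spec_divide_invoices_by_depth; infer_instance

-- ===== CLAIM (what is proved, stated in full; the proofs are below) =====
def Claim_equal_divide_invoices_by_depth : Prop := ∀ (invoices : List (List (String × String))), Dom_divide_invoices_by_depth invoices → Pre_divide_invoices_by_depth invoices → Spec_divide_invoices_by_depth invoices (divide_invoices_by_depth invoices)

-- ===== LEMMAS AND PROOFS =====

-- proof-side abbreviations for the two values both programs extract from an invoice
def pvTid (inv : List (String × String)) : String := (PySem.Dict.mk inv).getD "task_id" ""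
def pvKey (inv : List (String × String)) : Int := (PySem.Str.count (pvTid inv) "." : Int)

-- number of '.' characters, the structural reference both go-loops are reduced to
def pvCountDot : List Char → Nat
  | [] => 0
  | c :: rest => (if c = '.' then 1 else 0) + pvCountDot rest

lemma pv_count_go (fuel : Nat) : ∀ (l : List Char) (acc : Nat), l.length ≤ fuel →
    PySem.Chars.count.go ['.'] fuel l acc = acc + pvCountDot l := by
  induction fuel with
  | zero =>
    intro l acc h
    cases l with
    | nil => simp [PySem.Chars.count.go, pvCountDot]
    | cons c rest => simp at h
  | succ n ih =>
    intro l acc h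
    cases l with
    | nil => simp [PySem.Chars.count.go, pvCountDot]
    | cons c rest =>
      simp only [PySem.Chars.count.go, List.isPrefixOf, pvCountDot]
      by_cases hc : c = '.'
      · simp [hc, ih rest (acc + 1) (by simpa using h)]
        omega
      · simp [hc, (by simpa using (beq_eq_false_iff_ne (a := '.') (b := c)).mpr (Ne.symm hc) : ('.' == c) = false),
              ih rest acc (by simpa using h)]

lemma pv_split_go (fuel : Nat) : ∀ (l cur : List Char) (acc : List (List Char)), l.length < fuel →
    (PySem.Chars.splitOn.go ['.'] fuel l cur acc).length = acc.length + 1 + pvCountDot l := by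
  induction fuel with
  | zero => intro l cur acc h; omega
  | succ n ih =>
    intro l cur acc h
    cases l with
    | nil => simp [PySem.Chars.splitOn.go, pvCountDot]
    | cons c rest =>
      simp only [PySem.Chars.splitOn.go, List.isPrefixOf, pvCountDot]
      by_cases hc : c = '.'
      · cases n with
        | zero => simp at h
        | succ m =>
          simp [hc, ih rest [] (cur.reverse :: acc) (by simp at h ⊢; omega)]
          omega
      · simp [hc, (by simpa using (beq_eq_false_iff_ne (a := '.') (b := c)).mpr (Ne.symm hc) : ('.' == c) = false),
              ih rest (c :: cur) acc (by simpa using h)]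

-- A's depth expression equals B's: len(t.split('.')) - 1 = t.count('.')
lemma pv_depth_eq (t : String) :
    (((PySem.Str.split? t ".").getD []).length : Int) - 1 = (PySem.Str.count t "." : Nat) := by
  have hs : PySem.Str.split? t "." = some ((PySem.Chars.splitOn t.toList ['.']).map String.ofList) := rfl
  have hc : PySem.Str.count t "." = PySem.Chars.count.go ['.'] t.toList.length t.toList 0 := rfl
  have h1 := pv_split_go (t.toList.length + 1) t.toList [] [] (by omega)
  have h2 := pv_count_go t.toList.length t.toList 0 le_rfl
  rw [hs, hc, h2]
  simp only [Option.getD_some, List.length_map, PySem.Chars.splitOn, h1]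
  simp

-- the canonical grouping step A's loop body reduces to
def pvStep (d : PySem.Dict Int (PySem.Dict String (List (String × String))))
    (inv : List (String × String)) : PySem.Dict Int (PySem.Dict String (List (String × String))) :=
  d.insert (pvKey inv) ((d.getD (pvKey inv) PySem.Dict.empty).insert (pvTid inv) inv)

lemma pv_if_insert (d : PySem.Dict Int (PySem.Dict String (List (String × String))))
    (k : Int) (t : String) (inv : List (String × String)) :
    (if d.contains k then d else d.insert k PySem.Dict.empty).insert k
        (((if d.contains k then d else d.insert k PySem.Dict.empty).getD k PySem.Dict.empty).insert t inv)
      = d.insert k ((d.getD k PySem.Dict.empty).insert t inv) := by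
  by_cases h : d.contains k
  · simp [h]
  · have hf : d.contains k = false := by simpa using h
    simp [hf, PySem.Dict.getD_insert_self, PySem.Dict.insert_insert_self,
      PySem.Dict.getD_of_not_contains]

lemma pv_stepA_eq :
    (fun (d : PySem.Dict Int (PySem.Dict String (List (String × String)))) inv =>
      let task_id := (PySem.Dict.mk inv).getD "task_id" ""
      let depth : Int := (((PySem.Str.split? task_id ".").getD []).length : Int) - 1
      let d := if d.contains depth then d else d.insert depth PySem.Dict.empty
      d.insert depth ((d.getD depth PySem.Dict.empty).insert task_id inv)) = pvStep := by
  funext d inv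
  simp only [pv_depth_eq, pv_if_insert, pvStep, pvKey, pvTid]

lemma pv_getD_fold (c : Int) : ∀ (l : List (List (String × String)))
    (d : PySem.Dict Int (PySem.Dict String (List (String × String)))),
    (l.foldl pvStep d).getD c PySem.Dict.empty =
      (l.filter (fun inv => pvKey inv == c)).foldl
        (fun h inv => h.insert (pvTid inv) inv) (d.getD c PySem.Dict.empty) := by
  intro l
  induction l with
  | nil => intro d; simp
  | cons a rest ih =>
    intro d
    simp only [List.foldl_cons, List.filter_cons, ih, pvStep]
    by_cases h : pvKey a = c
    · simp [h, PySem.Dict.getD_insert_self]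
    · have hb : (pvKey a == c) = false := by simpa using h
      have hne : (c = pvKey a) = False := eq_false (fun hh => h hh.symm)
      simp [hb, PySem.Dict.getD_insert, hne]

-- ===== VERDICT (by name: the statement is the Claim_ definition above) =====
theorem divide_invoices_by_depth_spec : Claim_equal_divide_invoices_by_depth := by
  intro invoices _ _
  simp only [Spec_divide_invoices_by_depth, divide_invoices_by_depth,
    divide_invoices_by_depth_alt, pv_stepA_eq]
  have hkeys : (invoices.foldl pvStep PySem.Dict.empty).keys =
      PySem.List.dedup (invoices.map pvKey) := by
    have := PySem.Dict.keys_foldl_insert_key invoices pvKey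
      (fun d inv => (d.getD (pvKey inv) PySem.Dict.empty).insert (pvTid inv) inv)
      PySem.Dict.empty
    simpa [pvStep, PySem.Set.update_nil_left] using this
  have hnd : (invoices.foldl pvStep PySem.Dict.empty).keys.Nodup := by
    rw [hkeys, PySem.List.dedup_eq_ofList]; exact PySem.Set.nodup_ofList (invoices.map pvKey)
  rw [PySem.Dict.items_eq_map_keys _ hnd PySem.Dict.empty, hkeys]
  simp only [List.map_map, List.map_map, Function.comp, List.filter_map, pv_getD_fold,
    PySem.Dict.getD_empty, PySem.Dict.ofList, PySem.Dict.update, List.foldl_map]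
  rfl
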